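-- pv_equiv track=rewrite | github.com/justinbarak/2020_Advent_of_Code | Day10B.py | parse_for_ones
-- ===== SOURCE A (Python) =====
-- def parse_for_ones(list_in):
--     ones = 0
--     list_out = []
--     for item in list_in:
--         if item == 1:
--             ones += 1
--             continue
--         else:
--             list_out.append(ones)
--             ones = 0
--     return list_out
-- ===== SOURCE B (Python) =====
-- def parse_for_ones(list_in):
--     # run-based: jump over each maximal run of 1s, emit its length at the
--     # first non-1, then a 0 for every further consecutive non-1
--     out = []
--     i = 0
--     n = len(list_in)
--     while i < n:
--         start = i
--         while i < n and list_in[i] == 1: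
--             i += 1
--         if i == n:
--             break  # trailing run of ones emits nothing
--         out.append(i - start)
--         i += 1
--         while i < n and list_in[i] != 1:
--             out.append(0)
--             i += 1
--     return out
-- ===== Notes on version B (the rewrite author's own statement) =====
-- stated objective: alternative
-- what changed: Replaces the per-element counter/reset loop with a run-based walk that skips each maximal run of 1s at once, emits its length at the first non-1 and zeros for the remaining consecutive non-1s.
import Mathlib
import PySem

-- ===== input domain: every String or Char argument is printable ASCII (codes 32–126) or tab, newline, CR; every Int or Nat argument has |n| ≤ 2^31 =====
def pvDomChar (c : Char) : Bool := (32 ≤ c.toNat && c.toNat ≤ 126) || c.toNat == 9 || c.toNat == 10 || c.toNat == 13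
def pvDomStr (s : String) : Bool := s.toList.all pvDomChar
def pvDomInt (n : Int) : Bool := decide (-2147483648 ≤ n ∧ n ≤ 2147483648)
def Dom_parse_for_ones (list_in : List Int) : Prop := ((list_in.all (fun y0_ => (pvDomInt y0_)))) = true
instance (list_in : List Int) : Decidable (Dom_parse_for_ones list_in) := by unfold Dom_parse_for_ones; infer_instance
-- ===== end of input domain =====

-- B replaces A's per-element counter/reset loop by a run-based walk over maximal runs (alternative, same cost).


-- ===== PORT A =====
-- state (ones, list_out); one step per element, exactly A's loop
def parse_for_ones (list_in : List Int) : List Int :=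
  (list_in.foldl
    (fun (s : Int × List Int) item =>
      if item == 1 then (s.1 + 1, s.2) else (0, s.2 ++ [s.1]))
    (0, [])).2

-- ===== PORT B =====
-- run-based walk: skip the maximal run of 1s, emit its length at the first
-- non-1, then a 0 for each further consecutive non-1, recurse on the rest
def parse_for_ones_alt (list_in : List Int) : List Int :=
  match h : list_in.dropWhile (· == 1) with
  | [] => []
  | _ :: t =>
      ((list_in.takeWhile (· == 1)).length : Int)
        :: ((t.takeWhile (· != 1)).map (fun _ => (0 : Int))
            ++ parse_for_ones_alt (t.dropWhile (· != 1)))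
termination_by list_in.length
decreasing_by
  have h1 : (list_in.dropWhile (· == 1)).length ≤ list_in.length :=
    List.length_dropWhile_le _ _
  rw [h] at h1
  have h2 : (t.dropWhile (· != 1)).length ≤ t.length :=
    List.length_dropWhile_le _ _
  simp at h1
  omega

-- ===== PRECONDITION & SPEC =====
def Spec_parse_for_ones (list_in : List Int) (out : List Int) : Prop := out = parse_for_ones_alt list_in
instance (list_in : List Int) (out : List Int) : Decidable (Spec_parse_for_ones list_in out) := by unfold Spec_parse_for_ones; infer_instance

-- ===== CLAIM (what is proved, stated in full; the proofs are below) =====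
def Claim_equal_parse_for_ones : Prop := ∀ (list_in : List Int), Dom_parse_for_ones list_in → Spec_parse_for_ones list_in (parse_for_ones list_in)

-- ===== LEMMAS AND PROOFS =====

-- A's loop in state-passing form
def goA (ones : Int) (xs : List Int) : List Int :=
  match xs with
  | [] => []
  | x :: t => if x == 1 then goA (ones + 1) t else ones :: goA 0 t

lemma foldl_eq_goA (xs : List Int) (ones : Int) (out : List Int) :
    (xs.foldl
      (fun (s : Int × List Int) item =>
        if item == 1 then (s.1 + 1, s.2) else (0, s.2 ++ [s.1]))
      (ones, out)).2 = out ++ goA ones xs := by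
  induction xs generalizing ones out with
  | nil => simp [goA]
  | cons x t ih =>
      simp only [List.foldl_cons]
      by_cases hx : x = 1
      · have hx' : (x == 1) = true := by simp [hx]
        simp only [hx', if_pos]
        rw [ih]; simp [goA, hx]
      · have hx' : (x == 1) = false := by simp [hx]
        simp only [hx', Bool.false_eq_true, if_false]
        rw [ih]; simp [goA, hx]

-- B's recursion, generalized by a pending count of already-seen ones
def altGen (ones : Int) (xs : List Int) : List Int :=
  match xs.dropWhile (· == 1) with
  | [] => []
  | _ :: t =>
      (ones + ((xs.takeWhile (· == 1)).length : Int))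
        :: ((t.takeWhile (· != 1)).map (fun _ => (0 : Int))
            ++ parse_for_ones_alt (t.dropWhile (· != 1)))

lemma alt_eq_altGen0 (xs : List Int) : parse_for_ones_alt xs = altGen 0 xs := by
  rw [parse_for_ones_alt, altGen]
  cases xs.dropWhile (· == 1) <;> simp

lemma altGen0_nonone (t : List Int) :
    altGen 0 t
      = (t.takeWhile (· != 1)).map (fun _ => (0 : Int))
        ++ parse_for_ones_alt (t.dropWhile (· != 1)) := by
  cases t with
  | nil => simp [altGen, parse_for_ones_alt]
  | cons y t' =>
      by_cases hy : y = 1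
      · subst hy
        simp only [List.takeWhile_cons, List.dropWhile_cons]
        norm_num
        exact (alt_eq_altGen0 _).symm
      · simp [altGen, List.takeWhile_cons, List.dropWhile_cons, hy]

lemma goA_eq_altGen (xs : List Int) : ∀ ones, goA ones xs = altGen ones xs := by
  induction xs with
  | nil => intro ones; simp [goA, altGen]
  | cons x t ih =>
      intro ones
      by_cases hx : x = 1
      · subst hx
        have : goA ones (1 :: t) = goA (ones + 1) t := by simp [goA]
        rw [this, ih]
        simp only [altGen, List.dropWhile_cons, List.takeWhile_cons]
        norm_num
        cases t.dropWhile (· == 1) <;> simp <;> ring_nf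
      · have : goA ones (x :: t) = ones :: goA 0 t := by simp [goA, hx]
        rw [this, ih, altGen0_nonone]
        simp [altGen, List.dropWhile_cons, List.takeWhile_cons, hx]

-- ===== VERDICT (by name: the statement is the Claim_ definition above) =====
theorem parse_for_ones_spec : Claim_equal_parse_for_ones := by
  intro xs _
  show parse_for_ones xs = parse_for_ones_alt xs
  rw [parse_for_ones, foldl_eq_goA, goA_eq_altGen, alt_eq_altGen0]
  simp
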